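-- pv_equiv track=rewrite | github.com/EnzoMello/Algoritmos-e-Programa-o | Atividades/Pratica_Recursividade/fatorial_rec.py | recursiva_vogal_consoante
-- ===== SOURCE A (Python) =====
-- def recursiva_vogal_consoante(frase,index,vogais,consoantes):
--     if index >= len(frase):
--         return '{} e {}'.format(vogais,consoantes)
--     letra = frase[index]
--     codigo = ord(letra)
--     if codigo in (65,69,73,79,85):
--         vogais += 1
--     elif codigo >= 65 and codigo <= 90:
--         consoantes +=1
--
--     return recursiva_vogal_consoante(frase,index + 1,vogais,consoantes)
-- ===== SOURCE B (Python) =====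
-- def recursiva_vogal_consoante(frase, index, vogais, consoantes):
--     for i in range(index, len(frase)):
--         codigo = ord(frase[i])
--         if codigo in (65, 69, 73, 79, 85):
--             vogais += 1
--         elif 65 <= codigo <= 90:
--             consoantes += 1
--     return '{} e {}'.format(vogais, consoantes)
-- ===== Notes on version B (the rewrite author's own statement) =====
-- stated objective: idiomatic
-- what changed: Replaces the tail recursion (one Python call frame per character, RecursionError-prone) by a single for-loop over range(index, len(frase)) with local counter updates.
import Mathlib
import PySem

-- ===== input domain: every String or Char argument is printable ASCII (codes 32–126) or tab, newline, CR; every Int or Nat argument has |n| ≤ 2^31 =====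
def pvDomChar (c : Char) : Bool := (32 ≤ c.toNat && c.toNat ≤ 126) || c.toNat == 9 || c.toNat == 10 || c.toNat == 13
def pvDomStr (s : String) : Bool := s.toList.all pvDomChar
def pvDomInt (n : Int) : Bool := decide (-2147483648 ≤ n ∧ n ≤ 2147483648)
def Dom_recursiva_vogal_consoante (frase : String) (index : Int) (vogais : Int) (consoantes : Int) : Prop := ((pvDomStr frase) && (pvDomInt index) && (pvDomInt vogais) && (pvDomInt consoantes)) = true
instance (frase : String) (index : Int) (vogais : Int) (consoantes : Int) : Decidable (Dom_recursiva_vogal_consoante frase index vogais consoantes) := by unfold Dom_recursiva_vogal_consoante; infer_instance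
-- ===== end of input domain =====

-- B replaces A's tail recursion by a single for-loop over range(index, len(frase)) (idiomatic, O(1) stack).

-- '{} e {}'.format(vogais, consoantes)
def fmtVC (vogais consoantes : Int) : String :=
  PySem.Str.join "" [PySem.Int.toStr vogais, " e ", PySem.Int.toStr consoantes]

-- ===== PORT A =====
def recursiva_vogal_consoante (frase : String) (index : Int) (vogais : Int) (consoantes : Int) : String :=
  if _h : PySem.Str.len frase ≤ index then
    fmtVC vogais consoantes
  else
    match PySem.Str.pyGet? frase index with
    | none => ""   -- Python raises IndexError here; excluded by Pre_
    | some letra =>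
      let codigo : Int := letra.toNat
      if codigo = 65 ∨ codigo = 69 ∨ codigo = 73 ∨ codigo = 79 ∨ codigo = 85 then
        recursiva_vogal_consoante frase (index + 1) (vogais + 1) consoantes
      else if 65 ≤ codigo ∧ codigo ≤ 90 then
        recursiva_vogal_consoante frase (index + 1) vogais (consoantes + 1)
      else
        recursiva_vogal_consoante frase (index + 1) vogais consoantes
termination_by (PySem.Str.len frase - index).toNat
decreasing_by all_goals (simp [PySem.Str.len_eq] at *; omega)

-- ===== PORT B =====
def stepB (frase : String) (acc : Int × Int) (i : Int) : Int × Int :=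
  match PySem.Str.pyGet? frase i with
  | none => acc   -- Python raises IndexError here; excluded by Pre_
  | some letra =>
    let codigo : Int := letra.toNat
    if codigo = 65 ∨ codigo = 69 ∨ codigo = 73 ∨ codigo = 79 ∨ codigo = 85 then
      (acc.1 + 1, acc.2)
    else if 65 ≤ codigo ∧ codigo ≤ 90 then
      (acc.1, acc.2 + 1)
    else
      acc

def recursiva_vogal_consoante_alt (frase : String) (index : Int) (vogais : Int) (consoantes : Int) : String :=
  let r := (PySem.List.pyRange index (PySem.Str.len frase) 1).foldl (stepB frase) (vogais, consoantes)
  fmtVC r.1 r.2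

-- ===== PRECONDITION & SPEC =====
-- Pre_ excludes exactly the inputs where Python raises IndexError (both A and B do): index < -len(frase).
def Pre_recursiva_vogal_consoante (frase : String) (index : Int) (vogais : Int) (consoantes : Int) : Prop :=
  -(frase.toList.length : Int) ≤ index
instance (frase : String) (index : Int) (vogais : Int) (consoantes : Int) : Decidable (Pre_recursiva_vogal_consoante frase index vogais consoantes) := by unfold Pre_recursiva_vogal_consoante; infer_instance

def pvWitness_recursiva_vogal_consoante : String × Int × Int × Int := ("Abc DE!", 0, 0, 0)

def Spec_recursiva_vogal_consoante (frase : String) (index : Int) (vogais : Int) (consoantes : Int) (out : String) : Prop := out = recursiva_vogal_consoante_alt frase index vogais consoantes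
instance (frase : String) (index : Int) (vogais : Int) (consoantes : Int) (out : String) : Decidable (Spec_recursiva_vogal_consoante frase index vogais consoantes out) := by unfold Spec_recursiva_vogal_consoante; infer_instance

-- ===== CLAIM (what is proved, stated in full; the proofs are below) =====
def Claim_equal_recursiva_vogal_consoante : Prop := ∀ (frase : String) (index : Int) (vogais : Int) (consoantes : Int), Dom_recursiva_vogal_consoante frase index vogais consoantes → Pre_recursiva_vogal_consoante frase index vogais consoantes → Spec_recursiva_vogal_consoante frase index vogais consoantes (recursiva_vogal_consoante frase index vogais consoantes)

-- ===== LEMMAS AND PROOFS =====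

lemma strGet_isSome (s : String) (i : Int) (h1 : -(s.toList.length : Int) ≤ i)
    (h2 : i < (s.toList.length : Int)) : ∃ l, PySem.Str.pyGet? s i = some l := by
  have he : PySem.Str.pyGet? s i = PySem.List.pyGet? s.toList i := by
    simp [PySem.Str.pyGet?]
  rw [he]
  cases hc : PySem.List.pyGet? s.toList i with
  | some l => exact ⟨l, rfl⟩
  | none =>
    rw [PySem.List.pyGet?_eq_none_iff] at hc
    exact absurd ⟨h1, h2⟩ hc

lemma rvc_eq_foldl (frase : String) (n : Nat) :
    ∀ index vogais consoantes : Int,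
    -(frase.toList.length : Int) ≤ index →
    (PySem.Str.len frase - index).toNat = n →
    recursiva_vogal_consoante frase index vogais consoantes
      = recursiva_vogal_consoante_alt frase index vogais consoantes := by
  induction n with
  | zero =>
    intro index v c hpre hn
    have hle : PySem.Str.len frase ≤ index := by
      simp [PySem.Str.len_eq] at hn ⊢; omega
    rw [recursiva_vogal_consoante, dif_pos hle]
    unfold recursiva_vogal_consoante_alt
    rw [PySem.List.pyRange_one_eq_nil hle, List.foldl_nil]
  | succ m ih =>
    intro index v c hpre hn
    have hlt : index < PySem.Str.len frase := by
      simp [PySem.Str.len_eq] at hn ⊢; omega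
    have hlt' : index < (frase.toList.length : Int) := by
      simpa [PySem.Str.len_eq] using hlt
    obtain ⟨letra, hl⟩ := strGet_isSome frase index hpre hlt'
    have halt : recursiva_vogal_consoante_alt frase index v c
        = recursiva_vogal_consoante_alt frase (index + 1)
            (stepB frase (v, c) index).1 (stepB frase (v, c) index).2 := by
      unfold recursiva_vogal_consoante_alt
      rw [PySem.List.pyRange_one_cons hlt, List.foldl_cons]
    rw [halt, recursiva_vogal_consoante,
        dif_neg (by omega : ¬ PySem.Str.len frase ≤ index), hl]
    have hpre' : -(frase.toList.length : Int) ≤ index + 1 := by omega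
    have hn' : (PySem.Str.len frase - (index + 1)).toNat = m := by
      simp [PySem.Str.len_eq] at hn ⊢; omega
    simp only [stepB, hl]
    split_ifs with h1 h2 <;>
      simpa using ih (index + 1) _ _ hpre' hn'

-- ===== VERDICT (by name: the statement is the Claim_ definition above) =====
theorem recursiva_vogal_consoante_spec : Claim_equal_recursiva_vogal_consoante := by
  intro frase index vogais consoantes _hdom hpre
  exact rvc_eq_foldl frase ((PySem.Str.len frase - index).toNat) index vogais consoantes hpre rfl
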